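-- pv_equiv track=rewrite | github.com/davidvela/MyFirstPythonProject | zCOMP/fp_datam.py | check_perf
-- ===== SOURCE A (Python) =====
-- def check_perf(lA, lB):
--     assert(len(lA) == len(lB))
--     less3  = 0
--     less15 = 0
--     num = 0
--     for i in range(len(lA)):
--         num = abs(lA[i]-lB[i])
--         if num > 3: less3+=1
--         if num > 15: less15+=1
--     return less3, less15
-- ===== SOURCE B (Python) =====
-- def check_perf(lA, lB):
--     assert(len(lA) == len(lB))
--     # sort the absolute differences descending; each count is the length of the
--     # strict prefix above its threshold (early-exit scan on the sorted list)
--     sd = sorted((abs(a - b) for a, b in zip(lA, lB)), reverse=True)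
--     def prefix_gt(t):
--         k = 0
--         for d in sd:
--             if d <= t:
--                 break
--             k += 1
--         return k
--     return prefix_gt(3), prefix_gt(15)
-- ===== Notes on version B (the rewrite author's own statement) =====
-- stated objective: alternative
-- what changed: Instead of one fused index loop with two live counters, B sorts the absolute differences in descending order and reads each count off as the length of the strict prefix above the threshold, found by an early-exit scan.
import Mathlib
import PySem

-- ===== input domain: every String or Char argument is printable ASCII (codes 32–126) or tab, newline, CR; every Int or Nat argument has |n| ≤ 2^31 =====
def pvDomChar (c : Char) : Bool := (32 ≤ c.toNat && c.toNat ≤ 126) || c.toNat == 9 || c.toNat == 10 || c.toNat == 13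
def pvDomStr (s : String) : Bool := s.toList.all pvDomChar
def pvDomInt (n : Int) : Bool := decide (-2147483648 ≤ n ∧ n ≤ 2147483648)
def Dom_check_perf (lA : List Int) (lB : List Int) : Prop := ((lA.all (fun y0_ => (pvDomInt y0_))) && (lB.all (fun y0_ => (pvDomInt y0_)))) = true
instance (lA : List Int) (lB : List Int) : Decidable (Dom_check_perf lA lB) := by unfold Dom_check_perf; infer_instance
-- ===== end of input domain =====

-- B sorts the absolute differences descending and reads the counts off as prefix lengths (early-exit scans) — alternative algorithm, not claimed faster.

-- ===== PORT A =====
-- one fused loop over indices keeping two live counters (and the loop variable num)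
def check_perf (lA : List Int) (lB : List Int) : Int × Int :=
  let r := (PySem.List.pyRange 0 (PySem.List.len lA) 1).foldl
    (fun (st : Int × Int × Int) i =>
      let num := |PySem.List.pyGetD lA i 0 - PySem.List.pyGetD lB i 0|
      let less3 := if num > 3 then st.1 + 1 else st.1
      let less15 := if num > 15 then st.2.1 + 1 else st.2.1
      (less3, less15, num)) ((0 : Int), (0 : Int), (0 : Int))
  (r.1, r.2.1)

-- ===== PORT B =====
-- for-loop with break and counter k, transcribed as structural recursion carrying k
def prefixGtGo (t : Int) : List Int → Int → Int
  | [], k => k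
  | d :: rest, k => if d ≤ t then k else prefixGtGo t rest (k + 1)

def check_perf_alt (lA : List Int) (lB : List Int) : Int × Int :=
  let sd := PySem.List.sorted ((lA.zip lB).map (fun p => |p.1 - p.2|)) (fun x => x) true
  (prefixGtGo 3 sd 0, prefixGtGo 15 sd 0)

-- ===== PRECONDITION & SPEC =====
-- Pre_ excludes unequal lengths, on which Python A raises AssertionError.
def Pre_check_perf (lA : List Int) (lB : List Int) : Prop := lA.length = lB.length
instance (lA : List Int) (lB : List Int) : Decidable (Pre_check_perf lA lB) := by unfold Pre_check_perf; infer_instance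
def pvWitness_check_perf : List Int × List Int := ([1, 20, -5], [0, 0, 0])

def Spec_check_perf (lA : List Int) (lB : List Int) (out : Int × Int) : Prop := out = check_perf_alt lA lB
instance (lA : List Int) (lB : List Int) (out : Int × Int) : Decidable (Spec_check_perf lA lB out) := by unfold Spec_check_perf; infer_instance

-- ===== CLAIM (what is proved, stated in full; the proofs are below) =====
def Claim_equal_check_perf : Prop := ∀ (lA : List Int) (lB : List Int), Dom_check_perf lA lB → Pre_check_perf lA lB → Spec_check_perf lA lB (check_perf lA lB)

-- ===== LEMMAS AND PROOFS =====

-- A's fold over the list of differences computes the two filter-counts, shifted by the accumulator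
theorem counts_foldl (D : List Int) : ∀ (s : Int × Int × Int),
    (D.foldl (fun (st : Int × Int × Int) num' =>
      let num := |num'|
      let less3 := if num > 3 then st.1 + 1 else st.1
      let less15 := if num > 15 then st.2.1 + 1 else st.2.1
      (less3, less15, num)) s).1
      = s.1 + ((D.filter (fun d => |d| > 3)).length : Int)
    ∧ (D.foldl (fun (st : Int × Int × Int) num' =>
      let num := |num'|
      let less3 := if num > 3 then st.1 + 1 else st.1
      let less15 := if num > 15 then st.2.1 + 1 else st.2.1
      (less3, less15, num)) s).2.1
      = s.2.1 + ((D.filter (fun d => |d| > 15)).length : Int) := by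
  induction D with
  | nil => intro s; simp
  | cons d t ih =>
    intro s
    simp only [List.foldl_cons, List.filter_cons]
    rcases ih (if |d| > 3 then s.1 + 1 else s.1,
               (if |d| > 15 then s.2.1 + 1 else s.2.1), |d|) with ⟨h1, h2⟩
    constructor
    · rw [h1]; by_cases h : |d| > 3 <;> simp [h] <;> push_cast <;> ring
    · rw [h2]; by_cases h : |d| > 15 <;> simp [h] <;> push_cast <;> ring

theorem diff_getD (lA lB : List Int) (h : lA.length = lB.length)
    (i : Int) (h0 : 0 ≤ i) (hi : i < (lA.length : Int)) :
    PySem.List.pyGetD lA i 0 - PySem.List.pyGetD lB i 0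
      = PySem.List.pyGetD (List.zipWith (fun a b => a - b) lA lB) i 0 := by
  have hlen : (List.zipWith (fun (a b : Int) => a - b) lA lB).length = lA.length := by
    simp [List.length_zipWith, h]
  rw [PySem.List.pyGetD_eq_getElem lA 0 h0 hi,
      PySem.List.pyGetD_eq_getElem lB 0 h0 (by rw [← h]; exact hi),
      PySem.List.pyGetD_eq_getElem _ 0 h0 (by rw [hlen]; exact hi)]
  rw [List.getElem_zipWith]

theorem filter_diffs (c : Int) : ∀ (lA lB : List Int),
    ((lA.zip lB).map (fun p => |p.1 - p.2|)).filter (fun d => d > c)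
      = ((List.zipWith (fun a b => a - b) lA lB).filter (fun d => |d| > c)).map (fun d => |d|)
  | [], _ => by simp
  | _ :: _, [] => by simp
  | a :: t, b :: u => by
    simp only [List.zip_cons_cons, List.map_cons, List.zipWith_cons_cons, List.filter_cons,
      filter_diffs c t u]
    by_cases hc : |a - b| > c <;> simp [hc]

-- port A equals the two filter-counts over the difference list
theorem check_perf_counts (lA lB : List Int) (h : lA.length = lB.length) :
    check_perf lA lB
      = (((((lA.zip lB).map (fun p => |p.1 - p.2|)).filter (fun d => d > 3)).length : Int),
         ((((lA.zip lB).map (fun p => |p.1 - p.2|)).filter (fun d => d > 15)).length : Int)) := by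
  unfold check_perf
  have hb : (PySem.List.pyRange 0 (PySem.List.len lA) 1).foldl
      (fun (st : Int × Int × Int) i =>
        let num := |PySem.List.pyGetD lA i 0 - PySem.List.pyGetD lB i 0|
        let less3 := if num > 3 then st.1 + 1 else st.1
        let less15 := if num > 15 then st.2.1 + 1 else st.2.1
        (less3, less15, num)) ((0 : Int), (0 : Int), (0 : Int))
      = (List.zipWith (fun a b => a - b) lA lB).foldl
      (fun (st : Int × Int × Int) num' =>
        let num := |num'|
        let less3 := if num > 3 then st.1 + 1 else st.1
        let less15 := if num > 15 then st.2.1 + 1 else st.2.1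
        (less3, less15, num)) ((0 : Int), (0 : Int), (0 : Int)) := by
    have hlen : PySem.List.len lA = PySem.List.len (List.zipWith (fun (a b : Int) => a - b) lA lB) := by
      simp [PySem.List.len, List.length_zipWith, h]
    rw [PySem.List.foldl_congr_mem _ _ (fun (st : Int × Int × Int) i =>
        let num := |PySem.List.pyGetD (List.zipWith (fun a b => a - b) lA lB) i 0|
        let less3 := if num > 3 then st.1 + 1 else st.1
        let less15 := if num > 15 then st.2.1 + 1 else st.2.1
        (less3, less15, num)) _
      (by
        intro acc x hx
        rw [PySem.List.mem_pyRange_one] at hx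
        have hx2 : x < (lA.length : Int) := by
          simpa [PySem.List.len] using hx.2
        simp only [diff_getD lA lB h x hx.1 hx2])]
    rw [hlen]
    exact PySem.List.foldl_pyRange_zero_pyGetD (List.zipWith (fun a b => a - b) lA lB) 0
      (fun (st : Int × Int × Int) num' =>
        let num := |num'|
        let less3 := if num > 3 then st.1 + 1 else st.1
        let less15 := if num > 15 then st.2.1 + 1 else st.2.1
        (less3, less15, num)) ((0 : Int), (0 : Int), (0 : Int))
  rw [hb]
  rcases counts_foldl (List.zipWith (fun a b => a - b) lA lB) ((0 : Int), (0 : Int), (0 : Int)) with ⟨h1, h2⟩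
  simp only [h1, h2, zero_add]
  rw [filter_diffs 3 lA lB, filter_diffs 15 lA lB]
  simp

-- on a descending-sorted list, the early-exit prefix scan computes the filter-count
theorem prefixGtGo_eq (t : Int) : ∀ (sd : List Int),
    sd.Pairwise (fun a b => b ≤ a) → ∀ (k : Int),
    prefixGtGo t sd k = k + ((sd.filter (fun d => d > t)).length : Int)
  | [], _, k => by simp [prefixGtGo]
  | d :: rest, hp, k => by
    rcases List.pairwise_cons.1 hp with ⟨hd, hrest⟩
    by_cases hdt : d ≤ t
    · have hnone : rest.filter (fun x => x > t) = [] := by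
        apply List.filter_eq_nil_iff.2
        intro x hx
        have : x ≤ t := le_trans (hd x hx) hdt
        simpa using not_lt.2 this
      simp [prefixGtGo, hdt, List.filter_cons, not_lt.2 hdt, hnone]
    · have := prefixGtGo_eq t rest hrest (k + 1)
      simp only [prefixGtGo, if_neg hdt, this, List.filter_cons]
      have hgt : d > t := lt_of_not_ge hdt
      simp [hgt]
      push_cast
      ring

theorem check_perf_eq (lA lB : List Int) (h : lA.length = lB.length) :
    check_perf lA lB = check_perf_alt lA lB := by
  rw [check_perf_counts lA lB h]
  unfold check_perf_alt
  set diffs := (lA.zip lB).map (fun p => |p.1 - p.2|) with hdiffs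
  have hperm : (PySem.List.sorted diffs (fun x => x) true).Perm diffs :=
    PySem.List.sorted_perm diffs (fun x => x) true
  have hpw : (PySem.List.sorted diffs (fun x => x) true).Pairwise (fun a b => b ≤ a) :=
    PySem.List.sorted_pairwise_rev diffs (fun x => x)
  have h3 := prefixGtGo_eq 3 _ hpw 0
  have h15 := prefixGtGo_eq 15 _ hpw 0
  have hf3 : ((PySem.List.sorted diffs (fun x => x) true).filter (fun d => d > 3)).length
      = (diffs.filter (fun d => d > 3)).length := (hperm.filter _).length_eq
  have hf15 : ((PySem.List.sorted diffs (fun x => x) true).filter (fun d => d > 15)).length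
      = (diffs.filter (fun d => d > 15)).length := (hperm.filter _).length_eq
  simp [h3, h15, hf3, hf15]

-- ===== VERDICT (by name: the statement is the Claim_ definition above) =====
theorem check_perf_spec : Claim_equal_check_perf := by
  intro lA lB _ hpre
  unfold Spec_check_perf
  exact check_perf_eq lA lB hpre
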